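-- pv_equiv track=rewrite | github.com/elitan/euler | 070/main.py | transformPrime
-- ===== SOURCE A (Python) =====
-- def transformPrime(primeList):
-- 	pl = list()
--
-- 	for p in primeList:
-- 		found = False
-- 		for k in pl:
-- 			if p == k[0]:
-- 				k[1] += 1
-- 				found = True
-- 		if not found:
-- 			pl.append([p,1])
-- 	return pl
-- ===== SOURCE B (Python) =====
-- def transformPrime(primeList):
-- 	uniques = list(dict.fromkeys(primeList))
-- 	return [[v, primeList.count(v)] for v in uniques]
-- ===== Notes on version B (the rewrite author's own statement) =====
-- stated objective: idiomatic
-- what changed: A interleaves searching and incrementing a running [value,count] table inside one loop; B is two phases: take the distinct values in first-appearance order (dict.fromkeys) and then count each value's occurrences with list.count.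
import Mathlib
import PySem

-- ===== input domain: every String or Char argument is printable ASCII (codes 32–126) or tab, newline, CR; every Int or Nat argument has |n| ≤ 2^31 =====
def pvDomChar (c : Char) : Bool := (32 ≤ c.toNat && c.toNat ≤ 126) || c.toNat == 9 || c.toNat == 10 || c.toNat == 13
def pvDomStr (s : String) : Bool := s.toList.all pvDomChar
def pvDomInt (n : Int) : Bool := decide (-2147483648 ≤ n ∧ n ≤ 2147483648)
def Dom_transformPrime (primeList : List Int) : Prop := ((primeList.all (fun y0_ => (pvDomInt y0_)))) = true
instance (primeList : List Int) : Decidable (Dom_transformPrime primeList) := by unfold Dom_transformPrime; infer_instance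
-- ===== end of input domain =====

-- B replaces A's interleaved search-and-increment with an idiomatic two-phase version (distinct values in first-appearance order, then count each); same cost class.

-- ===== PORT A =====
-- inner 'for k in pl' loop: possibly increment k[1], set found if p == k[0]
def pvInnerA (p : Int) : List (List Int) → List (List Int) × Bool
  | [] => ([], false)
  | k :: rest =>
      let k' := if p == k.getD 0 0 then [k.getD 0 0, k.getD 1 0 + 1] else k
      let f := p == k.getD 0 0
      let r := pvInnerA p rest
      (k' :: r.1, f || r.2)

def transformPrime (primeList : List Int) : List (List Int) :=
  primeList.foldl (fun pl p =>
    let r := pvInnerA p pl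
    if !r.2 then r.1 ++ [[p, 1]] else r.1) []

-- ===== PORT B =====
def transformPrime_alt (primeList : List Int) : List (List Int) :=
  -- list(dict.fromkeys(primeList)) = first occurrences in order = PySem.List.dedup
  (PySem.List.dedup primeList).map (fun v => [v, (primeList.count v : Int)])

-- ===== PRECONDITION & SPEC =====
def Spec_transformPrime (primeList : List Int) (out : List (List Int)) : Prop := out = transformPrime_alt primeList
instance (primeList : List Int) (out : List (List Int)) : Decidable (Spec_transformPrime primeList out) := by unfold Spec_transformPrime; infer_instance

-- ===== CLAIM (what is proved, stated in full; the proofs are below) =====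
def Claim_equal_transformPrime : Prop := ∀ (primeList : List Int), Dom_transformPrime primeList → Spec_transformPrime primeList (transformPrime primeList)

-- ===== LEMMAS AND PROOFS =====

def pvStepU (u : List Int) (p : Int) : List Int := if !(u.contains p) then u ++ [p] else u

lemma pvMemFoldlU (xs : List Int) : ∀ u v, (v ∈ List.foldl pvStepU u xs ↔ v ∈ u ∨ v ∈ xs) := by
  induction xs with
  | nil => simp
  | cons p rest ih =>
      intro u v
      simp only [List.foldl_cons]
      rw [ih]
      unfold pvStepU
      by_cases hp : p ∈ u
      · have hc : u.contains p = true := List.elem_eq_true_of_mem hp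
        rw [hc]
        simp only [Bool.not_true, Bool.false_eq_true, if_false, List.mem_cons]
        constructor
        · tauto
        · rintro (h | h | h)
          exacts [Or.inl h, Or.inl (h ▸ hp), Or.inr h]
      · have hc : u.contains p = false := by simpa using hp
        rw [hc]
        simp only [Bool.not_false, if_true, List.mem_append, List.mem_cons]
        tauto

lemma pvInnerA_map (p : Int) (L : List Int) (g : Int → Int) :
    pvInnerA p (L.map (fun v => [v, g v])) =
      (L.map (fun v => [v, g v + if v = p then 1 else 0]), L.contains p) := by
  induction L with
  | nil => simp [pvInnerA]
  | cons v rest ih =>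
      by_cases h : v = p
      · subst h
        simp only [List.map_cons, pvInnerA, ih, List.contains_cons, List.getD_cons_zero,
          List.getD_cons_succ, beq_self_eq_true]
        norm_num
      · have hpv : (p == v) = false := beq_eq_false_iff_ne.mpr (Ne.symm h)
        have hvp : (v == p) = false := beq_eq_false_iff_ne.mpr h
        simp only [List.map_cons, pvInnerA, ih, List.contains_cons, List.getD_cons_zero,
          List.getD_cons_succ, hpv]
        simp [h]

lemma pvCountApp (v p : Int) (ys : List Int) :
    ((ys ++ [p]).count v : Int) = (ys.count v : Int) + if v = p then 1 else 0 := by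
  by_cases h : v = p
  · subst h; simp [List.count_append]
  · simp [List.count_append, List.count_nil, h, Ne.symm h]

lemma pvFoldU_eq (xs : List Int) :
    List.foldl pvStepU [] xs = List.foldl PySem.Set.add [] xs := by
  have h : pvStepU = PySem.Set.add := by
    funext u p
    unfold pvStepU PySem.Set.add
    by_cases hm : p ∈ u
    · simp [hm]
    · simp [hm]
  rw [h]

lemma pvMain (xs : List Int) :
    transformPrime xs = (List.foldl pvStepU [] xs).map (fun v => [v, (xs.count v : Int)]) := by
  unfold transformPrime
  induction xs using List.reverseRecOn with
  | nil => simp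
  | append_singleton ys p ih =>
      rw [List.foldl_append, ih, List.foldl_append]
      simp only [List.foldl_cons, List.foldl_nil]
      rw [pvInnerA_map]
      by_cases hp : p ∈ ys
      · have hmem : p ∈ List.foldl pvStepU [] ys := (pvMemFoldlU ys [] p).mpr (Or.inr hp)
        have hc : (List.foldl pvStepU [] ys).contains p = true := by
          simp [hmem]
        rw [hc]
        simp only [Bool.not_true, Bool.false_eq_true, if_false]
        rw [show pvStepU (List.foldl pvStepU [] ys) p = List.foldl pvStepU [] ys from by
          simp [pvStepU, hmem]]
        apply List.map_congr_left
        intro v _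
        rw [pvCountApp]
      · have hmem : p ∉ List.foldl pvStepU [] ys := fun hm =>
          hp (((pvMemFoldlU ys [] p).mp hm).resolve_left (by simp))
        have hc : (List.foldl pvStepU [] ys).contains p = false := by
          simp [hmem]
        rw [hc]
        simp only [Bool.not_false, if_true]
        rw [show pvStepU (List.foldl pvStepU [] ys) p = List.foldl pvStepU [] ys ++ [p] from by
          simp [pvStepU, hmem]]
        rw [List.map_append]
        congr 1
        · apply List.map_congr_left
          intro v hv
          have hvys : v ∈ ys := by
            have := (pvMemFoldlU ys [] v).mp hv
            simpa using this
          have hvp : v ≠ p := fun h => hp (h ▸ hvys)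
          rw [pvCountApp]
        · have h0 : ys.count p = 0 := List.count_eq_zero.mpr hp
          simp [List.count_append, h0]

-- ===== VERDICT (by name: the statement is the Claim_ definition above) =====
theorem transformPrime_spec : Claim_equal_transformPrime := by
  intro xs _
  unfold Spec_transformPrime transformPrime_alt
  rw [PySem.List.dedup_eq_ofList, PySem.Set.ofList_eq_foldl, ← pvFoldU_eq]
  exact pvMain xs
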